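-- pv_equiv track=rewrite | github.com/wesleyd/aoc15 | day24a.py | all_smallest3
-- ===== SOURCE A (Python) =====
-- import itertools
-- import math
-- from typing import Iterator, Set
--
-- def balance(pkgs: Set[int], ngroups: int) -> Iterator[Set[int]]:
--     """All ways to extract equal weight 1/ngroups-th from pkgs, fewest first."""
--     target_weight = sum(pkgs) // ngroups
--     max_pkgs = len(pkgs) // ngroups
--     for n in range(1, max_pkgs+1):
--         for group in itertools.combinations(pkgs, n):
--             if sum(group) != target_weight:
--                 continue
--             yield set(group)
--
-- def all_smallest3(pkgs: Set[int]) -> Iterator[Set[int]]: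
--     """All the combinations of the smallest third by weight of packages."""
--     smallest = math.inf
--     for group in balance(pkgs, 3):
--         if len(group) < smallest:
--             smallest = len(group)
--         if len(group) > smallest:
--             return
--         yield group
-- ===== SOURCE B (Python) =====
-- def _subsets(items):
--     """All subsets of items as tuples, include-first depth-first order."""
--     if not items:
--         return [()]
--     rest = _subsets(items[1:])
--     return [(items[0],) + s for s in rest] + rest
--
-- def all_smallest3(pkgs):
--     """All the combinations of the smallest third by weight of packages."""
--     items = list(pkgs)
--     target = sum(items) // 3
--     limit = len(items) // 3
--     good = [s for s in _subsets(items) if sum(s) == target and 1 <= len(s) <= limit]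
--     n = min((len(s) for s in good), default=None)
--     if n is not None:
--         for s in good:
--             if len(s) == n:
--                 yield set(s)
-- ===== Notes on version B (the rewrite author's own statement) =====
-- stated objective: alternative
-- what changed: Replaces A's per-size itertools.combinations scans truncated by a math.inf running minimum with one recursive powerset enumeration filtered once (sum == total//3 and size within len//3), followed by selecting the subsets of minimal length; Pre_ merely restates the declared Set[int] contract (no duplicate elements).
import Mathlib
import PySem

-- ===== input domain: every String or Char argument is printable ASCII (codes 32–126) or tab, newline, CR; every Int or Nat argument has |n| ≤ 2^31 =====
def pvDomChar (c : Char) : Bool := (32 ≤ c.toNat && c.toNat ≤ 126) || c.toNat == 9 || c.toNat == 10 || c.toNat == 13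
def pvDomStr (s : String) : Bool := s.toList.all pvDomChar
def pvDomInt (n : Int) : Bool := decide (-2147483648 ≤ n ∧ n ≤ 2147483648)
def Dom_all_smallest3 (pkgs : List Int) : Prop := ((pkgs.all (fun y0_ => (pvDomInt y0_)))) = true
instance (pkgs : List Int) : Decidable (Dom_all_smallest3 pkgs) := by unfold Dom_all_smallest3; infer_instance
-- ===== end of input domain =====

-- B replaces the per-size combinations search truncated by a running minimum with one recursive
-- powerset enumeration, filtered once, followed by a min-length selection (alternative decomposition, no speed claim).

-- ===== PORT A =====
-- itertools.combinations(pkgs, n): all length-n subsequences in lexicographic index order (exact port)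
def pvCombos : Nat → List Int → List (List Int)
  | 0, _ => [[]]
  | _ + 1, [] => []
  | n + 1, x :: xs => (pvCombos n xs).map (fun g => x :: g) ++ pvCombos (n + 1) xs

-- balance(pkgs, ngroups): the generator, materialised as the list of its yields
def pvBalance (pkgs : List Int) (ngroups : Int) : List (List Int) :=
  let target := PySem.Int.floordiv pkgs.sum ngroups
  let maxp := PySem.Int.floordiv (PySem.List.len pkgs) ngroups
  (PySem.List.pyRange 1 (maxp + 1) 1).flatMap (fun n =>
    (pvCombos n.toNat pkgs).filterMap (fun g =>
      if g.sum ≠ target then none else some (PySem.Set.ofList g)))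

-- the loop body of all_smallest3: state = (smallest : Option Nat (none = math.inf), stopped, yields)
def pvStepA (st : Option Nat × Bool × List (List Int)) (group : List Int) :
    Option Nat × Bool × List (List Int) :=
  match st with
  | (smallest, stopped, out) =>
    if stopped then (smallest, stopped, out)
    else
      let sm : Nat := match smallest with
        | none => group.length
        | some s => if group.length < s then group.length else s
      if sm < group.length then (some sm, true, out)
      else (some sm, false, out ++ [group])

def all_smallest3 (pkgs : List Int) : List (List Int) :=
  ((pvBalance pkgs 3).foldl pvStepA (none, false, [])).2.2

-- ===== PORT B =====
-- _subsets(items): every subset as a tuple, include-first depth-first order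
def pvSubsets : List Int → List (List Int)
  | [] => [[]]
  | x :: xs => (pvSubsets xs).map (fun s => x :: s) ++ pvSubsets xs

def all_smallest3_alt (pkgs : List Int) : List (List Int) :=
  let target := PySem.Int.floordiv pkgs.sum 3
  let limit := PySem.Int.floordiv (PySem.List.len pkgs) 3
  let good := (pvSubsets pkgs).filter (fun s =>
    s.sum == target && decide (1 ≤ (s.length : Int)) && decide ((s.length : Int) ≤ limit))
  match PySem.List.min? (good.map (fun s => (s.length : Int))) (fun x => x) with
  | none => []
  | some n => (good.filter (fun s => (s.length : Int) == n)).map PySem.Set.ofList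

-- ===== PRECONDITION & SPEC =====
-- A's parameter is declared Set[int]; Pre_ excludes lists with duplicate elements (not sets), on which
-- A's running-minimum over set-collapsed group sizes truncates arbitrarily — an artefact of feeding a non-set.
def Pre_all_smallest3 (pkgs : List Int) : Prop := pkgs.Nodup
instance (pkgs : List Int) : Decidable (Pre_all_smallest3 pkgs) := by unfold Pre_all_smallest3; infer_instance
def pvWitness_all_smallest3 : List Int := [1, 2, 3]

def Spec_all_smallest3 (pkgs : List Int) (out : List (List Int)) : Prop := out = all_smallest3_alt pkgs
instance (pkgs : List Int) (out : List (List Int)) : Decidable (Spec_all_smallest3 pkgs out) := by unfold Spec_all_smallest3; infer_instance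

-- ===== CLAIM (what is proved, stated in full; the proofs are below) =====
def Claim_equal_all_smallest3 : Prop := ∀ (pkgs : List Int), Dom_all_smallest3 pkgs → Pre_all_smallest3 pkgs → Spec_all_smallest3 pkgs (all_smallest3 pkgs)

-- ===== LEMMAS AND PROOFS =====

-- proof-side canonical form: the first size in ns whose matching combinations are non-empty
def pvLoopB (pkgs : List Int) (target : Int) : List Int → List (List Int)
  | [] => []
  | n :: ns =>
    let ms := (pvCombos n.toNat pkgs).filterMap (fun g =>
      if g.sum = target then some (PySem.Set.ofList g) else none)
    if ms.isEmpty then pvLoopB pkgs target ns else ms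

-- every combination is a sublist of the source of the requested length
theorem pvCombos_mem {n : Nat} {xs g : List Int} (h : g ∈ pvCombos n xs) :
    g.Sublist xs ∧ g.length = n := by
  induction xs generalizing n g with
  | nil =>
    cases n with
    | zero => simp [pvCombos] at h; simp [h]
    | succ n => simp [pvCombos] at h
  | cons x xs ih =>
    cases n with
    | zero => simp [pvCombos] at h; simp [h]
    | succ n =>
      simp only [pvCombos, List.mem_append, List.mem_map] at h
      rcases h with ⟨g', hg', rfl⟩ | h
      · obtain ⟨hs, hl⟩ := ih hg'
        exact ⟨List.Sublist.cons₂ x hs, by simp [hl]⟩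
      · obtain ⟨hs, hl⟩ := ih h
        exact ⟨List.Sublist.cons x hs, hl⟩

theorem pvFold_stopped (gs : List (List Int)) (s : Option Nat) (acc : List (List Int)) :
    gs.foldl pvStepA (s, true, acc) = (s, true, acc) := by
  induction gs with
  | nil => rfl
  | cons g gs ih => simp [List.foldl_cons, pvStepA, ih]

theorem pvFold_block (m : Nat) (gs : List (List Int)) (hgs : ∀ g ∈ gs, g.length = m)
    (acc : List (List Int)) :
    gs.foldl pvStepA (some m, false, acc) = (some m, false, acc ++ gs) := by
  induction gs generalizing acc with
  | nil => simp
  | cons g gs ih =>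
    have hg : g.length = m := hgs g (by simp)
    rw [List.foldl_cons, show pvStepA (some m, false, acc) g = (some m, false, acc ++ [g]) by
      simp [pvStepA, hg]]
    rw [ih (fun g' hg' => hgs g' (by simp [hg'])) (acc ++ [g])]
    simp

theorem pvFold_bigger (m : Nat) (gs : List (List Int)) (hgs : ∀ g ∈ gs, m < g.length)
    (acc : List (List Int)) :
    (gs.foldl pvStepA (some m, false, acc)).2.2 = acc := by
  cases gs with
  | nil => rfl
  | cons g gs =>
    have hg : m < g.length := hgs g (by simp)
    rw [show List.foldl pvStepA (some m, false, acc) (g :: gs)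
        = List.foldl pvStepA (some m, true, acc) gs by
      simp [List.foldl_cons, pvStepA, if_neg (by omega : ¬ g.length < m), hg]]
    rw [pvFold_stopped]

-- A's filter body equals the canonical form's filter body
theorem pvFilter_eq (target : Int) (gs : List (List Int)) :
    gs.filterMap (fun g => if g.sum ≠ target then none else some (PySem.Set.ofList g))
      = gs.filterMap (fun g => if g.sum = target then some (PySem.Set.ofList g) else none) := by
  apply List.filterMap_congr
  intro g _
  by_cases h : g.sum = target <;> simp [h]

-- A = canonical form, generalized over the list of sizes
theorem pvMain (pkgs : List Int) (hnd : pkgs.Nodup) (target : Int) (ns : List Int)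
    (hpos : ∀ n ∈ ns, 1 ≤ n) (hsort : ns.Pairwise (· < ·)) :
    ((ns.flatMap (fun n => (pvCombos n.toNat pkgs).filterMap (fun g =>
        if g.sum ≠ target then none else some (PySem.Set.ofList g)))).foldl
      pvStepA (none, false, [])).2.2 = pvLoopB pkgs target ns := by
  induction ns with
  | nil => simp [pvLoopB]
  | cons n ns ih =>
    have hn1 : 1 ≤ n := hpos n (by simp)
    rw [List.pairwise_cons] at hsort
    obtain ⟨hlt, htail⟩ := hsort
    have hblk_len : ∀ m : Int, ∀ h ∈ (pvCombos m.toNat pkgs).filterMap (fun g =>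
        if g.sum ≠ target then none else some (PySem.Set.ofList g)), h.length = m.toNat := by
      intro m h hh
      rw [List.mem_filterMap] at hh
      obtain ⟨g, hg, hgh⟩ := hh
      by_cases hs : g.sum = target
      · simp only [hs, ne_eq, not_true_eq_false, if_false] at hgh
        obtain ⟨hsub, hlen⟩ := pvCombos_mem hg
        have hgnd : g.Nodup := hsub.nodup hnd
        rw [Option.some_inj] at hgh
        rw [← hgh, PySem.Set.ofList_eq_self_of_nodup g hgnd, hlen]
      · simp [hs] at hgh
    set blk := (pvCombos n.toNat pkgs).filterMap (fun g =>
      if g.sum ≠ target then none else some (PySem.Set.ofList g)) with hblkdef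
    rw [List.flatMap_cons, List.foldl_append]
    show _ = pvLoopB pkgs target (n :: ns)
    rw [pvLoopB]
    simp only [← pvFilter_eq, ← hblkdef]
    cases hblk : blk with
    | nil =>
      simp only [List.isEmpty_nil, if_true, List.foldl_nil]
      exact ih (fun n' hn' => hpos n' (by simp [hn'])) htail
    | cons h rest =>
      simp only [List.isEmpty_cons, if_false, Bool.false_eq_true]
      have hh : h.length = n.toNat := hblk_len n h (by rw [← hblkdef, hblk]; simp)
      have hrest : ∀ g ∈ rest, g.length = n.toNat := fun g hg =>
        hblk_len n g (by rw [← hblkdef, hblk]; simp [hg])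
      rw [List.foldl_cons, show pvStepA (none, false, []) h = (some n.toNat, false, [h]) by
        simp [pvStepA, hh]]
      rw [pvFold_block n.toNat rest hrest [h]]
      have hbig : ∀ g ∈ ns.flatMap (fun m => (pvCombos m.toNat pkgs).filterMap (fun g =>
          if g.sum ≠ target then none else some (PySem.Set.ofList g))), n.toNat < g.length := by
        intro g hg
        rw [List.mem_flatMap] at hg
        obtain ⟨m, hm, hgm⟩ := hg
        have := hblk_len m g hgm
        have h1 : n < m := hlt m hm
        omega
      rw [pvFold_bigger n.toNat _ hbig ([h] ++ rest)]
      simp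

-- B side: the length-n slice of the powerset enumeration is exactly pvCombos n
theorem pvSubsets_filter_len (xs : List Int) (n : Nat) :
    (pvSubsets xs).filter (fun s => s.length == n) = pvCombos n xs := by
  induction xs generalizing n with
  | nil => cases n <;> simp [pvSubsets, pvCombos]
  | cons x xs ih =>
    cases n with
    | zero =>
      simp only [pvSubsets, pvCombos, List.filter_append, List.filter_map]
      rw [show ((pvSubsets xs).filter ((fun s => s.length == 0) ∘ (fun s => x :: s))) = [] by
        apply List.filter_eq_nil_iff.mpr; intro s _; simp]
      have h0 : pvCombos 0 xs = [[]] := by cases xs <;> rfl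
      simpa [h0] using ih 0
    | succ n =>
      simp only [pvSubsets, pvCombos, List.filter_append, List.filter_map]
      rw [show ((pvSubsets xs).filter ((fun s => s.length == n + 1) ∘ (fun s => x :: s)))
          = (pvSubsets xs).filter (fun s => s.length == n) by
        apply List.filter_congr; intro s _; simp]
      rw [ih n, ih (n + 1)]

theorem pvCombos_sub_subsets {n : Nat} {xs g : List Int} (h : g ∈ pvCombos n xs) :
    g ∈ pvSubsets xs := by
  rw [← pvSubsets_filter_len xs n] at h
  exact (List.mem_filter.mp h).1

-- bucket of size n (the canonical form's ms, without the set-coercion)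
def pvBucket (pkgs : List Int) (target : Int) (n : Int) : List (List Int) :=
  (pvCombos n.toNat pkgs).filter (fun g => g.sum == target)

theorem pvFilterMap_eq_map_filter (target : Int) (gs : List (List Int)) :
    gs.filterMap (fun g => if g.sum = target then some (PySem.Set.ofList g) else none)
      = (gs.filter (fun g => g.sum == target)).map PySem.Set.ofList := by
  induction gs with
  | nil => rfl
  | cons g gs ih =>
    by_cases h : g.sum = target <;> simp [h, ih]

theorem pvGood_filter_len (pkgs : List Int) (target limit n : Int) (hn1 : 1 ≤ n)
    (hn2 : n ≤ limit) :
    ((pvSubsets pkgs).filter (fun s =>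
        s.sum == target && decide (1 ≤ (s.length : Int)) && decide ((s.length : Int) ≤ limit))).filter
      (fun s => (s.length : Int) == n) = pvBucket pkgs target n := by
  rw [List.filter_filter]
  unfold pvBucket
  rw [← pvSubsets_filter_len pkgs n.toNat, List.filter_filter]
  apply List.filter_congr
  intro s _
  by_cases hl : s.length = n.toNat
  · have hc : ((s.length : Int) == n) = true := by
      simp only [beq_iff_eq]; omega
    have hc2 : (s.length == n.toNat) = true := by simp [hl]
    simp only [hc, hc2, Bool.and_true, Bool.true_and]
    have h1 : (1 ≤ (s.length : Int)) := by omega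
    have h2 : ((s.length : Int) ≤ limit) := by omega
    simp [h1, h2]
  · have hc : ((s.length : Int) == n) = false := by
      simp only [beq_eq_false_iff_ne, ne_eq]; omega
    have hc2 : (s.length == n.toNat) = false := by simp [hl]
    simp [hc, hc2]

-- lengths occurring in good are exactly the sizes with a non-empty bucket inside [1, limit]
theorem pvMem_lengths_iff (pkgs : List Int) (target limit n : Int) :
    (n ∈ ((pvSubsets pkgs).filter (fun s =>
        s.sum == target && decide (1 ≤ (s.length : Int)) && decide ((s.length : Int) ≤ limit))).map
        (fun s => (s.length : Int)))
      ↔ (1 ≤ n ∧ n ≤ limit ∧ pvBucket pkgs target n ≠ []) := by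
  constructor
  · intro h
    rw [List.mem_map] at h
    obtain ⟨s, hs, rfl⟩ := h
    rw [List.mem_filter] at hs
    obtain ⟨hmem, hp⟩ := hs
    simp only [Bool.and_eq_true, beq_iff_eq, decide_eq_true_eq] at hp
    refine ⟨hp.1.2, hp.2, ?_⟩
    have hsC : s ∈ pvCombos s.length pkgs := by
      rw [← pvSubsets_filter_len pkgs s.length]
      exact List.mem_filter.mpr ⟨hmem, by simp⟩
    have : s ∈ pvBucket pkgs target (s.length : Int) := by
      unfold pvBucket
      rw [Int.toNat_natCast]
      exact List.mem_filter.mpr ⟨hsC, by simp [hp.1.1]⟩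
    intro hnil
    rw [hnil] at this
    exact (List.not_mem_nil).elim this
  · rintro ⟨h1, h2, hne⟩
    obtain ⟨g, hg⟩ := List.exists_mem_of_ne_nil _ hne
    unfold pvBucket at hg
    rw [List.mem_filter] at hg
    obtain ⟨hgc, hgs⟩ := hg
    obtain ⟨_, hlen⟩ := pvCombos_mem hgc
    have hlenI : (g.length : Int) = n := by omega
    rw [List.mem_map]
    refine ⟨g, ?_, hlenI⟩
    rw [List.mem_filter]
    refine ⟨pvCombos_sub_subsets hgc, ?_⟩
    simp only [Bool.and_eq_true, decide_eq_true_eq]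
    exact ⟨⟨hgs, by omega⟩, by omega⟩

-- the canonical form returns the bucket of the minimal productive size
theorem pvLoopB_eq_bucket (pkgs : List Int) (target : Int) (m : Int) (ns : List Int)
    (hsort : ns.Pairwise (· < ·)) (hm : m ∈ ns)
    (hne : pvBucket pkgs target m ≠ [])
    (hmin : ∀ n ∈ ns, n < m → pvBucket pkgs target n = []) :
    pvLoopB pkgs target ns = (pvBucket pkgs target m).map PySem.Set.ofList := by
  induction ns with
  | nil => exact absurd hm (List.not_mem_nil)
  | cons n ns ih =>
    rw [List.pairwise_cons] at hsort
    obtain ⟨hlt, htail⟩ := hsort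
    rw [pvLoopB]
    simp only [pvFilterMap_eq_map_filter]
    rcases List.mem_cons.mp hm with rfl | hm'
    · have : ¬ ((pvBucket pkgs target m).map PySem.Set.ofList).isEmpty = true := by
        simp [List.isEmpty_iff, hne]
      simp only [pvBucket] at this ⊢
      rw [if_neg this]
    · have hn_lt : n < m := hlt m hm'
      have hnil : pvBucket pkgs target n = [] := hmin n (by simp) hn_lt
      simp only [pvBucket] at hnil
      rw [hnil]
      simp only [List.map_nil, List.isEmpty_nil, if_true]
      exact ih htail hm' (fun k hk hkm => hmin k (by simp [hk]) hkm)

-- if every bucket in ns is empty, the canonical form yields nothing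
theorem pvLoopB_nil (pkgs : List Int) (target : Int) (ns : List Int)
    (h : ∀ n ∈ ns, pvBucket pkgs target n = []) :
    pvLoopB pkgs target ns = [] := by
  induction ns with
  | nil => rfl
  | cons n ns ih =>
    rw [pvLoopB]
    simp only [pvFilterMap_eq_map_filter]
    have hnil : pvBucket pkgs target n = [] := h n (by simp)
    simp only [pvBucket] at hnil
    rw [hnil]
    simp only [List.map_nil, List.isEmpty_nil, if_true]
    exact ih (fun k hk => h k (by simp [hk]))

-- B = canonical form, with the match written out and target/limit generalized
theorem pvAltCore (pkgs : List Int) (target limit : Int) :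
    (match PySem.List.min? ((((pvSubsets pkgs).filter (fun s =>
        s.sum == target && decide (1 ≤ (s.length : Int)) && decide ((s.length : Int) ≤ limit))).map
        (fun s => (s.length : Int))) ) (fun x => x) with
      | none => ([] : List (List Int))
      | some n => (((pvSubsets pkgs).filter (fun s =>
          s.sum == target && decide (1 ≤ (s.length : Int)) && decide ((s.length : Int) ≤ limit))).filter
          (fun s => (s.length : Int) == n)).map PySem.Set.ofList)
      = pvLoopB pkgs target (PySem.List.pyRange 1 (limit + 1) 1) := by
  cases hmo : PySem.List.min? ((((pvSubsets pkgs).filter (fun s =>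
      s.sum == target && decide (1 ≤ (s.length : Int)) && decide ((s.length : Int) ≤ limit))).map
      (fun s => (s.length : Int))) ) (fun x => x) with
  | none =>
    have hempty := (PySem.List.min?_eq_none_iff _ _).mp hmo
    symm
    apply pvLoopB_nil
    intro n hn
    by_contra hne
    rcases PySem.List.mem_pyRange_one.mp hn with ⟨h1, h2⟩
    have hmm : n ∈ ((pvSubsets pkgs).filter (fun s =>
        s.sum == target && decide (1 ≤ (s.length : Int)) && decide ((s.length : Int) ≤ limit))).map
        (fun s => (s.length : Int)) :=
      (pvMem_lengths_iff pkgs target limit n).mpr ⟨h1, by omega, hne⟩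
    rw [hempty] at hmm
    exact (List.not_mem_nil) hmm
  | some m =>
    have hmem := PySem.List.min?_mem hmo
    have hmin := PySem.List.min?_isMin hmo
    obtain ⟨h1, h2, hne⟩ := (pvMem_lengths_iff pkgs target limit m).mp hmem
    show (((pvSubsets pkgs).filter (fun s =>
        s.sum == target && decide (1 ≤ (s.length : Int)) && decide ((s.length : Int) ≤ limit))).filter
        (fun s => (s.length : Int) == m)).map PySem.Set.ofList
      = pvLoopB pkgs target (PySem.List.pyRange 1 (limit + 1) 1)
    rw [pvGood_filter_len pkgs target limit m h1 h2]
    symm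
    apply pvLoopB_eq_bucket pkgs target m _ (PySem.List.pairwise_lt_pyRange_one _ _)
      (PySem.List.mem_pyRange_one.mpr ⟨h1, by omega⟩) hne
    intro n hn hnm
    by_contra hbne
    rcases PySem.List.mem_pyRange_one.mp hn with ⟨hn1, hn2⟩
    have hmm : n ∈ ((pvSubsets pkgs).filter (fun s =>
        s.sum == target && decide (1 ≤ (s.length : Int)) && decide ((s.length : Int) ≤ limit))).map
        (fun s => (s.length : Int)) :=
      (pvMem_lengths_iff pkgs target limit n).mpr ⟨hn1, by omega, hbne⟩
    have := hmin n hmm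
    omega

theorem pvAltMain (pkgs : List Int) :
    all_smallest3_alt pkgs = pvLoopB pkgs (PySem.Int.floordiv pkgs.sum 3)
      (PySem.List.pyRange 1 (PySem.Int.floordiv (PySem.List.len pkgs) 3 + 1) 1) := by
  exact pvAltCore pkgs (PySem.Int.floordiv pkgs.sum 3) (PySem.Int.floordiv (PySem.List.len pkgs) 3)

-- ===== VERDICT (by name: the statement is the Claim_ definition above) =====
theorem all_smallest3_spec : Claim_equal_all_smallest3 := by
  intro pkgs _ hpre
  unfold Spec_all_smallest3
  rw [pvAltMain pkgs]
  unfold all_smallest3 pvBalance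
  simp only []
  exact pvMain pkgs hpre _ _ (fun n hn => (PySem.List.mem_pyRange_one.mp hn).1)
    (PySem.List.pairwise_lt_pyRange_one _ _)
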